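-- pv_equiv track=rewrite | github.com/DidiGG/Simulaci-n-de-Alfabetos-palabras-y-lenguajes-parte-B | punto6_menú_opciones.py | estrella
-- ===== SOURCE A (Python) =====
-- def estrella(lenguaje, n):
--     resultado = set([""])
--     for _ in range(n):
--         nuevo = set()
--         for palabra in resultado:
--             for elemento in lenguaje:
--                 nuevo.add(palabra + elemento)
--         resultado.update(nuevo)
--     return resultado
-- ===== SOURCE B (Python) =====
-- def estrella(lenguaje, n):
--     def crecer(resultado, k):
--         if k <= 0:
--             return resultado
--         nuevo = {p + e for p in resultado for e in lenguaje}
--         if nuevo <= resultado: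
--             return resultado
--         resultado.update(nuevo)
--         return crecer(resultado, k - 1)
--     return crecer(set([""]), n)
-- ===== Notes on version B (the rewrite author's own statement) =====
-- stated objective: alternative
-- what changed: The fixed count-n loop becomes a recursive fixpoint iteration with an early stop: each round's layer is built as one set comprehension and the recursion ends as soon as a round generates no new word, where A keeps executing up to n vacuous rounds.
import Mathlib
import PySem

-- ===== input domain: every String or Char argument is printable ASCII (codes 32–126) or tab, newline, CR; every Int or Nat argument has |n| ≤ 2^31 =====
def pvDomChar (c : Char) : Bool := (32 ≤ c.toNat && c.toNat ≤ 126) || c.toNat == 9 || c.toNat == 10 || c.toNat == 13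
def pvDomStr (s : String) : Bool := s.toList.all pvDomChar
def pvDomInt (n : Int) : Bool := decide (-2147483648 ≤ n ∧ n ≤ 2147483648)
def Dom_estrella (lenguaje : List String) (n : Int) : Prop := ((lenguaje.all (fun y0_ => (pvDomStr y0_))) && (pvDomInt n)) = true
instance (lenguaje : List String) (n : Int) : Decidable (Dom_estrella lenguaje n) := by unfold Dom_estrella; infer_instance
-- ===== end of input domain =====

-- B replaces A's fixed count-n loop by a recursive fixpoint iteration that stops as soon as a
-- round produces no new word (A keeps running vacuous rounds); same returned set.


-- ===== PORT A =====
def estrella (lenguaje : List String) (n : Int) : List String :=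
  (PySem.List.pyRange 0 n 1).foldl
    (fun resultado _ =>
      let nuevo :=
        resultado.foldl
          (fun nuevo palabra =>
            lenguaje.foldl
              (fun nuevo elemento => PySem.Set.add nuevo (palabra ++ elemento)) nuevo)
          (PySem.Set.empty)
      PySem.Set.update resultado nuevo)
    (PySem.Set.ofList [""])

-- ===== PORT B =====
-- helper 'crecer': the set comprehension {p + e for p in resultado for e in lenguaje} is
-- Set.ofList of the generated words in generation order
def pvCrecer (lenguaje : List String) (resultado : List String) (k : Int) : List String :=
  if k ≤ 0 then resultado
  else
    let nuevo :=
      PySem.Set.ofList (resultado.flatMap (fun p => lenguaje.map (fun e => p ++ e)))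
    if PySem.Set.issubset nuevo resultado then resultado
    else pvCrecer lenguaje (PySem.Set.update resultado nuevo) (k - 1)
termination_by k.toNat
decreasing_by omega

def estrella_alt (lenguaje : List String) (n : Int) : List String :=
  pvCrecer lenguaje (PySem.Set.ofList [""]) n

-- ===== PRECONDITION & SPEC =====
def Spec_estrella (lenguaje : List String) (n : Int) (out : List String) : Prop := out = estrella_alt lenguaje n
instance (lenguaje : List String) (n : Int) (out : List String) : Decidable (Spec_estrella lenguaje n out) := by unfold Spec_estrella; infer_instance

-- ===== CLAIM (what is proved, stated in full; the proofs are below) =====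
def Claim_equal_estrella : Prop := ∀ (lenguaje : List String) (n : Int), Dom_estrella lenguaje n → Spec_estrella lenguaje n (estrella lenguaje n)

-- ===== LEMMAS AND PROOFS =====

-- a nested loop over ps then L, acting on the concatenations, is a single fold over the flattened word list
theorem pv_foldl_nested {σ : Type} (L : List String) (g : σ → String → σ) :
    ∀ (ps : List String) (s : σ),
      ps.foldl (fun a p => L.foldl (fun a e => g a (p ++ e)) a) s
        = (ps.flatMap (fun p => L.map (fun e => p ++ e))).foldl g s := by
  intro ps
  induction ps with
  | nil => intro s; simp
  | cons p ps ih =>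
      intro s
      simp only [List.foldl_cons, List.flatMap_cons, List.foldl_append, ih, List.foldl_map]

-- adding already-present words changes nothing
theorem pv_update_absorb (s zs : List String) (h : ∀ w ∈ zs, w ∈ s) :
    PySem.Set.update s zs = s := by
  rw [PySem.Set.update_eq_append_filter]
  have hnil : (PySem.Set.ofList zs).filter (fun y => !(PySem.Set.contains s y)) = [] := by
    rw [List.filter_eq_nil_iff]
    intro y hy
    simp
    exact h y ((PySem.Set.mem_ofList zs y).1 hy)
  rw [hnil, List.append_nil]

-- updating with the dedup of a list is updating with the list itself
theorem pv_update_ofList (s zs : List String) :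
    PySem.Set.update s (PySem.Set.ofList zs) = PySem.Set.update s zs := by
  rw [PySem.Set.update_eq_append_filter s (PySem.Set.ofList zs), PySem.Set.ofList_ofList,
    ← PySem.Set.update_eq_append_filter]

-- A's one round, with its nested add-fold recognised as the dedup of the flattened word list
theorem pv_stepA (L r : List String) :
    PySem.Set.update r
      (r.foldl
        (fun nuevo palabra =>
          L.foldl (fun nuevo elemento => PySem.Set.add nuevo (palabra ++ elemento)) nuevo)
        (PySem.Set.empty))
    = PySem.Set.update r (PySem.Set.ofList (r.flatMap (fun p => L.map (fun e => p ++ e)))) := by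
  rw [pv_foldl_nested L PySem.Set.add r PySem.Set.empty]
  rfl

-- once a round generates nothing new, every later round of A leaves the set unchanged
theorem pv_fix (L : List String) :
    ∀ (it : List Int) (r : List String),
      (∀ w ∈ r.flatMap (fun p => L.map (fun e => p ++ e)), w ∈ r) →
      it.foldl
        (fun resultado _ =>
          let nuevo :=
            resultado.foldl
              (fun nuevo palabra =>
                L.foldl (fun nuevo elemento => PySem.Set.add nuevo (palabra ++ elemento)) nuevo)
              (PySem.Set.empty)
          PySem.Set.update resultado nuevo) r = r := by
  intro it
  induction it with
  | nil => intro r _; rfl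
  | cons i it ih =>
      intro r h
      have hstep :
          PySem.Set.update r
            (r.foldl
              (fun nuevo palabra =>
                L.foldl (fun nuevo elemento => PySem.Set.add nuevo (palabra ++ elemento)) nuevo)
              (PySem.Set.empty)) = r := by
        rw [pv_stepA, pv_update_ofList]
        exact pv_update_absorb r _ h
      simp only [List.foldl_cons]
      simpa only [hstep] using ih r h

-- main lemma: folding A's round over any iteration list of length k.toNat is B's fixpoint recursion
theorem pv_main (L : List String) :
    ∀ (it : List Int) (k : Int) (r : List String), it.length = k.toNat →
      it.foldl
        (fun resultado _ =>
          let nuevo :=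
            resultado.foldl
              (fun nuevo palabra =>
                L.foldl (fun nuevo elemento => PySem.Set.add nuevo (palabra ++ elemento)) nuevo)
              (PySem.Set.empty)
          PySem.Set.update resultado nuevo) r = pvCrecer L r k := by
  intro it
  induction it with
  | nil =>
      intro k r hlen
      have hk0 : k ≤ 0 := by simp at hlen; omega
      rw [pvCrecer, if_pos hk0]
      rfl
  | cons i it ih =>
      intro k r hlen
      have hk : ¬ k ≤ 0 := by simp at hlen; omega
      rw [pvCrecer, if_neg hk]
      by_cases hsub :
          PySem.Set.issubset
            (PySem.Set.ofList (r.flatMap (fun p => L.map (fun e => p ++ e)))) r = true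
      · rw [if_pos hsub]
        have hmem : ∀ w ∈ r.flatMap (fun p => L.map (fun e => p ++ e)), w ∈ r := by
          intro w hw
          exact (PySem.Set.issubset_iff _ _).1 hsub w ((PySem.Set.mem_ofList _ w).2 hw)
        exact pv_fix L (i :: it) r hmem
      · rw [if_neg hsub]
        simp only [List.foldl_cons]
        have hstep := pv_stepA L r
        simp only [hstep]
        exact ih (k - 1) _ (by simp at hlen; omega)

-- ===== VERDICT (by name: the statement is the Claim_ definition above) =====
theorem estrella_spec : Claim_equal_estrella := by
  intro lenguaje n _
  unfold Spec_estrella estrella estrella_alt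
  exact pv_main lenguaje (PySem.List.pyRange 0 n 1) n (PySem.Set.ofList [""])
    (by rw [PySem.List.length_pyRange_one]; omega)
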